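-- pv_equiv track=rewrite | github.com/phuyalsandeep10/backend-payment-project | scripts/quality/code_complexity_analyzer.py | _analyze_function_lengths
-- ===== SOURCE A (Python) =====
-- from typing import Dict, List, Tuple, Optional, Any
--
-- def _analyze_function_lengths(content: str) -> List[int]:
--     """Analyze function lengths in the file"""
--     lines = content.splitlines()
--     function_lengths = []
--     current_function_length = 0
--     in_function = False
--     base_indent = 0
--
--     for line in lines:
--         stripped = line.strip()
--
--         # Check if we're starting a new function
--         if stripped.startswith('def '):
--             if in_function and current_function_length > 0:
--                 function_lengths.append(current_function_length)
--
--             in_function = True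
--             current_function_length = 1
--             # Get the base indentation level
--             base_indent = len(line) - len(line.lstrip())
--
--         elif in_function:
--             # Check if we're still in the function
--             if stripped == '':
--                 current_function_length += 1
--             elif line.startswith(' ' * (base_indent + 1)) or stripped.startswith('"""') or stripped.startswith("'''"):
--                 current_function_length += 1
--             elif not stripped.startswith('#'):
--                 # We've exited the function
--                 if current_function_length > 0:
--                     function_lengths.append(current_function_length)
--                 in_function = False
--                 current_function_length = 0
--
--     # Don't forget the last function
--     if in_function and current_function_length > 0:
--         function_lengths.append(current_function_length)
--
--     return function_lengths
-- ===== SOURCE B (Python) =====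
-- def _classify(line):
--     """Classify one line into a token: ('D', base indent) for a def line,
--     ('A', 0) for a line that always counts (blank or docstring start),
--     ('C', leading spaces) for a comment, ('O', leading spaces) otherwise."""
--     s = line.strip()
--     if s.startswith('def '):
--         return ('D', len(line) - len(line.lstrip()))
--     if s == '' or s.startswith('"""') or s.startswith("'''"):
--         return ('A', 0)
--     if s.startswith('#'):
--         return ('C', len(line) - len(line.lstrip(' ')))
--     return ('O', len(line) - len(line.lstrip(' ')))
--
--
-- def _count(base, body):
--     """Length of one function: the def line plus its counted body lines."""
--     n = 1
--     for kind, lead in body: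
--         if kind == 'A' or lead >= base + 1:
--             n += 1
--         elif kind == 'C':
--             pass
--         else:
--             break
--     return n
--
--
-- def _analyze_function_lengths(content):
--     """Staged pipeline: tokenize lines once, locate def positions, segment
--     the token list between consecutive defs, and count each segment."""
--     toks = [_classify(line) for line in content.splitlines()]
--     dpos = [(i, t[1]) for i, t in enumerate(toks) if t[0] == 'D']
--     ends = [i for i, _ in dpos][1:] + [len(toks)]
--     return [_count(b, toks[i + 1:j]) for (i, b), j in zip(dpos, ends)]
-- ===== Notes on version B (the rewrite author's own statement) =====
-- stated objective: alternative
-- what changed: Replaces A's stateful single-pass scan (in_function/current-length/base-indent flags) by a staged pipeline: classify every line into a token once, collect def positions with enumerate, cut the token list into segments between consecutive defs by slicing, and map a per-segment counter over the segments.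
import Mathlib
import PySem

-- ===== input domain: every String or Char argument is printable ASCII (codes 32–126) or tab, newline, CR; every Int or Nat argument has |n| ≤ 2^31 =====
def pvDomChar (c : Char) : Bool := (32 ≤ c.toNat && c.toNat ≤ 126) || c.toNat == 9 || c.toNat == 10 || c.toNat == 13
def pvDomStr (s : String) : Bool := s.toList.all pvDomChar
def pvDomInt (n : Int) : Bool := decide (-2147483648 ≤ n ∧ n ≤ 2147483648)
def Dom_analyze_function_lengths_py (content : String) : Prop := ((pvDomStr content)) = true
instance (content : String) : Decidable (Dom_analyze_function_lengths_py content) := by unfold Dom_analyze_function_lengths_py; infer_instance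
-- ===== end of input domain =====

-- B replaces A's stateful line scan by a staged pipeline: classify lines into tokens,
-- locate the def positions, slice the token list between consecutive defs, count each
-- segment (objective: alternative decomposition, same cost).

-- ' ' * n  (n ≥ 0 in every use here)
def pvSpaces (n : Int) : String := String.ofList (List.replicate n.toNat ' ')

-- base_indent = len(line) - len(line.lstrip())
def pvBase (line : String) : Int := PySem.Str.len line - PySem.Str.len (PySem.Str.lstrip line)

-- ===== PORT A =====
-- state: (function_lengths, current_function_length, in_function, base_indent)
def stepA : (List Int × Int × Bool × Int) → String → (List Int × Int × Bool × Int)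
  | (lens, cur, inF, base), line =>
    if PySem.Str.startswith (PySem.Str.strip line) "def " = true then
      ((if inF = true ∧ 0 < cur then lens ++ [cur] else lens), 1, true, pvBase line)
    else if inF = true then
      if PySem.Str.strip line = "" then (lens, cur + 1, true, base)
      else if PySem.Str.startswith line (pvSpaces (base + 1)) = true
              ∨ PySem.Str.startswith (PySem.Str.strip line) "\"\"\"" = true
              ∨ PySem.Str.startswith (PySem.Str.strip line) "'''" = true then (lens, cur + 1, true, base)
      else if ¬ (PySem.Str.startswith (PySem.Str.strip line) "#" = true) then
        ((if 0 < cur then lens ++ [cur] else lens), 0, false, base)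
      else (lens, cur, inF, base)
    else (lens, cur, inF, base)

def analyze_function_lengths_py (content : String) : List Int :=
  let st := (PySem.Str.splitlines content).foldl stepA ([], 0, false, 0)
  if st.2.2.1 = true ∧ 0 < st.2.1 then st.1 ++ [st.2.1] else st.1

-- ===== PORT B =====
-- len(line) - len(line.lstrip(' ')): exact count of leading ' ' characters (ported by hand)
def pvLead (line : String) : Int := ((line.toList.takeWhile (fun c => c == ' ')).length : Int)

-- _classify: one line -> token ('D', base) | ('A', 0) | ('C', lead) | ('O', lead)
def classifyB (line : String) : String × Int :=
  let s := PySem.Str.strip line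
  if PySem.Str.startswith s "def " = true then ("D", pvBase line)
  else if s = "" ∨ PySem.Str.startswith s "\"\"\"" = true ∨ PySem.Str.startswith s "'''" = true then ("A", 0)
  else if PySem.Str.startswith s "#" = true then ("C", pvLead line)
  else ("O", pvLead line)

-- _count: def line plus its counted body lines (loop with break -> accumulator recursion)
def countB (base : Int) (n : Int) : List (String × Int) → Int
  | [] => n
  | (kind, lead) :: rest =>
    if kind = "A" ∨ base + 1 ≤ lead then countB base (n + 1) rest
    else if kind = "C" then countB base n rest
    else n

def analyze_function_lengths_py_alt (content : String) : List Int :=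
  let toks := (PySem.Str.splitlines content).map classifyB
  let dpos := ((PySem.List.enumerate toks).filter (fun p => p.2.1 == "D")).map (fun p => (p.1, p.2.2))
  let ends := (dpos.map Prod.fst).drop 1 ++ [(toks.length : Int)]
  (dpos.zip ends).map (fun p => countB p.1.2 1 (PySem.List.slice toks (some (p.1.1 + 1)) (some p.2)))

-- ===== PRECONDITION & SPEC =====
def Spec_analyze_function_lengths_py (content : String) (out : List Int) : Prop := out = analyze_function_lengths_py_alt content
instance (content : String) (out : List Int) : Decidable (Spec_analyze_function_lengths_py content out) := by unfold Spec_analyze_function_lengths_py; infer_instance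

-- ===== CLAIM (what is proved, stated in full; the proofs are below) =====
def Claim_equal_analyze_function_lengths_py : Prop := ∀ (content : String), Dom_analyze_function_lengths_py content → Spec_analyze_function_lengths_py content (analyze_function_lengths_py content)

-- ===== LEMMAS AND PROOFS =====

-- tokens that are not def starts
def pNotD : (String × Int) → Bool := fun t => !(t.1 == "D")

-- recursive reference version of B's segmentation
def segRec : List (String × Int) → List Int
  | [] => []
  | (kind, v) :: rest =>
    if kind == "D" then
      countB v 1 (rest.takeWhile pNotD) :: segRec (rest.dropWhile pNotD)
    else segRec rest
termination_by l => l.length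
decreasing_by
  · exact Nat.lt_succ_of_le (List.length_dropWhile_le _ _)
  · simp

-- pieces of B's index/zip formulation
def dposOf (toks : List (String × Int)) : List (Int × Int) :=
  ((PySem.List.enumerate toks).filter (fun p => p.2.1 == "D")).map (fun p => (p.1, p.2.2))

def endsOf (toks : List (String × Int)) : List Int :=
  ((dposOf toks).map Prod.fst).drop 1 ++ [(toks.length : Int)]

def idxVer (toks : List (String × Int)) : List Int :=
  ((dposOf toks).zip (endsOf toks)).map
    (fun p => countB p.1.2 1 (PySem.List.slice toks (some (p.1.1 + 1)) (some p.2)))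

theorem alt_eq_idxVer (content : String) :
    analyze_function_lengths_py_alt content = idxVer ((PySem.Str.splitlines content).map classifyB) := rfl

theorem enum_shift {α : Type} (xs : List α) (s : Int) :
    PySem.List.enumerate xs (s + 1) = (PySem.List.enumerate xs s).map (fun p => (p.1 + 1, p.2)) := by
  induction xs generalizing s with
  | nil => simp [PySem.List.enumerate_nil]
  | cons x xs ih =>
    rw [PySem.List.enumerate_cons, PySem.List.enumerate_cons, List.map_cons,
      show s + 1 + 1 = (s + 1) + 1 from rfl, ih (s + 1)]

theorem segRec_dropWhile (l : List (String × Int)) : segRec (l.dropWhile pNotD) = segRec l := by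
  induction l with
  | nil => rfl
  | cons t rest ih =>
    obtain ⟨k, v⟩ := t
    by_cases h : k = "D"
    · subst h
      rw [show List.dropWhile pNotD (("D", v) :: rest) = ("D", v) :: rest from by
        simp [List.dropWhile, pNotD]]
    · have hk : (k == "D") = false := beq_eq_false_iff_ne.mpr h
      rw [show List.dropWhile pNotD ((k, v) :: rest) = List.dropWhile pNotD rest from by
        simp [List.dropWhile, pNotD, hk], ih,
        show segRec ((k, v) :: rest) = segRec rest from by simp [segRec, h]]

theorem prefix_replicate_space (m : Nat) (l : List Char) :
    List.replicate m ' ' <+: l ↔ m ≤ (l.takeWhile (fun c => c == ' ')).length := by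
  induction m generalizing l with
  | zero => simp
  | succ m ih =>
    cases l with
    | nil => simp [List.replicate_succ]
    | cons c l =>
      by_cases hc : c = ' '
      · subst hc
        simp [List.replicate_succ, List.cons_prefix_cons, ih]
      · simp [List.replicate_succ, List.cons_prefix_cons, hc, Ne.symm hc]

theorem startswith_spaces_iff (line : String) (b : Int) :
    PySem.Str.startswith line (pvSpaces (b + 1)) = true ↔ b + 1 ≤ pvLead line := by
  have h : PySem.Str.startswith line (pvSpaces (b + 1)) = true ↔
      List.replicate (b + 1).toNat ' ' <+: line.toList := by
    rw [show pvSpaces (b + 1) = String.ofList (List.replicate (b + 1).toNat ' ') from rfl]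
    simp [PySem.Chars.startswith_iff]
  rw [h, prefix_replicate_space]; unfold pvLead; omega

theorem slice_cons_succ {α : Type} (x : α) (xs : List α) (a b : Int) (ha : 0 ≤ a) (hb : 0 ≤ b) :
    PySem.List.slice (x :: xs) (some (a + 1)) (some (b + 1)) = PySem.List.slice xs (some a) (some b) := by
  rw [PySem.List.slice_toNat _ (by omega) (by omega), PySem.List.slice_toNat _ ha hb,
    show (a + 1).toNat = a.toNat + 1 from by omega, show (b + 1).toNat = b.toNat + 1 from by omega,
    List.drop_succ_cons]
  congr 1
  omega

theorem dposOf_fst_nonneg (toks : List (String × Int)) :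
    ∀ q ∈ dposOf toks, 0 ≤ q.1 := by
  intro q hq
  simp only [dposOf, List.mem_map, List.mem_filter] at hq
  obtain ⟨p, ⟨hp, _⟩, rfl⟩ := hq
  rw [PySem.List.mem_enumerate_iff] at hp
  obtain ⟨k, _, rfl⟩ := hp
  simp

theorem endsOf_nonneg (toks : List (String × Int)) :
    ∀ e ∈ endsOf toks, 0 ≤ e := by
  intro e he
  simp only [endsOf, List.mem_append, List.mem_singleton] at he
  rcases he with h | rfl
  · have := List.mem_of_mem_drop h
    simp only [List.mem_map] at this
    obtain ⟨q, hq, rfl⟩ := this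
    exact dposOf_fst_nonneg toks q hq
  · positivity

theorem pred_head_dropWhile {α : Type} (p : α → Bool) :
    ∀ (l : List α) {x : α} {xs : List α}, l.dropWhile p = x :: xs → p x = false := by
  intro l
  induction l with
  | nil => intro x xs h; simp [List.dropWhile] at h
  | cons a l ih =>
    intro x xs h
    by_cases ha : p a = true
    · rw [List.dropWhile_cons_of_pos ha] at h; exact ih h
    · rw [List.dropWhile_cons_of_neg (by simpa using ha)] at h
      cases h; simpa using ha

theorem filter_enumerate_takeWhile (rest : List (String × Int)) (s : Int) :
    (PySem.List.enumerate (rest.takeWhile pNotD) s).filter (fun p => p.2.1 == "D") = [] := by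
  rw [List.filter_eq_nil_iff]
  intro p hp
  rw [PySem.List.mem_enumerate_iff] at hp
  obtain ⟨j, hj, rfl⟩ := hp
  have hmem : (rest.takeWhile pNotD)[j] ∈ rest.takeWhile pNotD := List.getElem_mem hj
  have hp' := List.mem_takeWhile_imp hmem
  simp only [pNotD, Bool.not_eq_eq_eq_not, Bool.not_true] at hp'
  simp [hp']

-- shape of dposOf: empty (no def token) or headed by the first def position
theorem dposOf_shape (rest : List (String × Int)) :
    (dposOf rest = [] ∧ rest.takeWhile pNotD = rest) ∨
    (∃ v tl, dposOf rest = (((rest.takeWhile pNotD).length : Int), v) :: tl) := by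
  have hsplit := List.takeWhile_append_dropWhile (p := pNotD) (l := rest)
  cases hdw : rest.dropWhile pNotD with
  | nil =>
    left
    have htw : rest.takeWhile pNotD = rest := by
      conv_rhs => rw [← hsplit]
      rw [hdw, List.append_nil]
    constructor
    · unfold dposOf
      conv_lhs => rw [← htw]
      rw [filter_enumerate_takeWhile]
      rfl
    · exact htw
  | cons d dw' =>
    right
    have hd : pNotD d = false := pred_head_dropWhile pNotD rest hdw
    have hd' : (d.1 == "D") = true := by
      simpa [pNotD] using hd
    refine ⟨d.2, ((PySem.List.enumerate dw'
        ((0 : Int) + ((rest.takeWhile pNotD).length : Int) + 1)).filter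
          (fun p => p.2.1 == "D")).map (fun p => (p.1, p.2.2)), ?_⟩
    unfold dposOf
    conv_lhs => rw [← hsplit, hdw]
    rw [PySem.List.enumerate_append, List.filter_append, filter_enumerate_takeWhile, List.nil_append,
      PySem.List.enumerate_cons, List.filter_cons]
    simp [hd']

theorem take_takeWhile {α : Type} (l : List α) (p : α → Bool) :
    l.take (l.takeWhile p).length = l.takeWhile p :=
  (List.prefix_iff_eq_take.mp (List.takeWhile_prefix p)).symm

theorem dposOf_cons (t : String × Int) (rest : List (String × Int)) :
    dposOf (t :: rest) =
      (if (t.1 == "D") = true then [((0 : Int), t.2)] else []) ++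
        (dposOf rest).map (fun q => (q.1 + 1, q.2)) := by
  unfold dposOf
  rw [PySem.List.enumerate_cons, enum_shift, List.filter_cons]
  by_cases hd : (t.1 == "D") = true
  · simp only [hd, if_true, List.filter_map, List.map_map, List.singleton_append, List.map_cons]
    rfl
  · simp only [hd, Bool.false_eq_true, if_false, List.filter_map, List.map_map, List.nil_append]
    rfl

theorem endsOf_shift (t : String × Int) (rest : List (String × Int)) (h : (t.1 == "D") = false) :
    endsOf (t :: rest) = (endsOf rest).map (fun e => e + 1) := by
  unfold endsOf
  rw [dposOf_cons, h]
  simp only [Bool.false_eq_true, if_false, List.nil_append, List.map_map]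
  rw [show ((fun q : Int × Int => q.1) ∘ fun q : Int × Int => (q.1 + 1, q.2))
        = (fun e => e + 1) ∘ (Prod.fst : Int × Int → Int) from rfl,
    ← List.map_map, ← List.map_drop, List.map_append]
  simp

theorem zip_shift_map (t : String × Int) (rest : List (String × Int))
    (D0 : List (Int × Int)) (E : List Int)
    (hD0 : ∀ q ∈ D0, 0 ≤ q.1) (hE : ∀ e ∈ E, 0 ≤ e) :
    ((D0.map (fun q => (q.1 + 1, q.2))).zip (E.map (fun e => e + 1))).map
        (fun p => countB p.1.2 1 (PySem.List.slice (t :: rest) (some (p.1.1 + 1)) (some p.2)))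
      = (D0.zip E).map
        (fun p => countB p.1.2 1 (PySem.List.slice rest (some (p.1.1 + 1)) (some p.2))) := by
  rw [List.zip_map, List.map_map]
  apply List.map_congr_left
  intro p hp
  obtain ⟨hp1, hp2⟩ := List.of_mem_zip hp
  simp only [Function.comp, Prod.map]
  rw [slice_cons_succ t rest (p.1.1 + 1) p.2 (by have := hD0 p.1 hp1; omega) (hE p.2 hp2)]

theorem idxVer_skip (t : String × Int) (rest : List (String × Int)) (h : ¬ t.1 = "D") :
    idxVer (t :: rest) = idxVer rest := by
  have hk : (t.1 == "D") = false := beq_eq_false_iff_ne.mpr h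
  unfold idxVer
  rw [dposOf_cons, hk, endsOf_shift t rest hk]
  simp only [Bool.false_eq_true, if_false, List.nil_append]
  exact zip_shift_map t rest _ _ (dposOf_fst_nonneg rest) (endsOf_nonneg rest)

theorem slice_cons_take (v : Int) (rest : List (String × Int)) (k : Nat) :
    PySem.List.slice (("D", v) :: rest) (some ((0 : Int) + 1)) (some ((k : Int) + 1))
      = rest.take k := by
  rw [slice_cons_succ _ rest 0 (k : Int) le_rfl (by positivity)]
  simp [PySem.List.slice_to_natCast]

theorem idxVer_def (v : Int) (rest : List (String × Int)) :
    idxVer (("D", v) :: rest) = countB v 1 (rest.takeWhile pNotD) :: idxVer rest := by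
  unfold idxVer
  rw [dposOf_cons]
  simp only [show ((("D", v) : String × Int).1 == "D") = true from rfl, if_true,
    List.singleton_append]
  unfold endsOf
  rw [dposOf_cons]
  simp only [show ((("D", v) : String × Int).1 == "D") = true from rfl, if_true,
    List.singleton_append, List.map_cons, List.drop_succ_cons, List.drop_zero, List.map_map,
    List.length_cons]
  rcases dposOf_shape rest with ⟨hnil, htw⟩ | ⟨v', tl, hcons⟩
  · rw [hnil]
    simp only [List.map_nil, List.nil_append, List.zip_cons_cons, List.zip_nil_left,
      List.map_cons, List.map_nil]
    rw [show ((rest.length + 1 : Nat) : Int) = ((rest.length : Nat) : Int) + 1 from by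
        push_cast; ring,
      slice_cons_take v rest rest.length, List.take_length, htw]
  · rw [hcons]
    rw [show ((rest.length + 1 : Nat) : Int) = ((rest.length : Nat) : Int) + 1 from by
        push_cast; ring]
    simp only [List.map_cons, List.cons_append, List.zip_cons_cons, List.map_cons,
      List.drop_succ_cons, List.drop_zero, Function.comp_apply]
    congr 1
    · rw [slice_cons_take v rest (rest.takeWhile pNotD).length, take_takeWhile]
    · have h1 : ∀ q ∈ ((((rest.takeWhile pNotD).length : Nat) : Int), v') :: tl, 0 ≤ q.1 := by
        intro q hq
        exact dposOf_fst_nonneg rest q (hcons ▸ hq)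
      have h2 : ∀ e ∈ (tl.map Prod.fst ++ [((rest.length : Nat) : Int)]), 0 ≤ e := by
        intro e he
        rcases List.mem_append.mp he with he | he
        · obtain ⟨q, hq, rfl⟩ := List.mem_map.mp he
          exact dposOf_fst_nonneg rest q (hcons ▸ List.mem_cons_of_mem _ hq)
        · rw [List.mem_singleton] at he
          subst he
          positivity
      rw [show ((((rest.takeWhile pNotD).length : Nat) : Int) + 1, v')
              :: List.map (fun q : Int × Int => (q.1 + 1, q.2)) tl
            = List.map (fun q : Int × Int => (q.1 + 1, q.2))
              (((((rest.takeWhile pNotD).length : Nat) : Int), v') :: tl) from rfl,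
        show List.map (Prod.fst ∘ fun q : Int × Int => (q.1 + 1, q.2)) tl
              ++ [((rest.length : Nat) : Int) + 1]
            = List.map (fun e => e + 1) (List.map Prod.fst tl ++ [((rest.length : Nat) : Int)]) from by
          rw [List.map_append, List.map_map]; rfl]
      exact zip_shift_map ("D", v) rest _ _ h1 h2

theorem idxVer_eq_segRec (toks : List (String × Int)) : idxVer toks = segRec toks := by
  induction toks with
  | nil => simp [idxVer, dposOf, endsOf, PySem.List.enumerate_nil, segRec]
  | cons t rest ih =>
    obtain ⟨k, v⟩ := t
    by_cases h : k = "D"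
    · subst h
      rw [idxVer_def, ih, ← segRec_dropWhile rest]
      simp [segRec, segRec_dropWhile]
    · rw [idxVer_skip (k, v) rest h, ih, show segRec ((k, v) :: rest) = segRec rest from by
        simp [segRec, h]]

-- A's trailing finalisation, as a function of the fold state
def finalizeA (st : List Int × Int × Bool × Int) : List Int :=
  if st.2.2.1 = true ∧ 0 < st.2.1 then st.1 ++ [st.2.1] else st.1

theorem segRec_classify_cons (line : String) (restT : List (String × Int))
    (h : ¬ PySem.Chars.startswith (PySem.Chars.strip line.toList) ['d','e','f',' '] = true) :
    segRec (classifyB line :: restT) = segRec restT := by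
  simp only [classifyB]
  split_ifs with h1 h2 h3
  · exact absurd (by simpa using h1) h
  · simp [segRec]
  · simp [segRec]
  · simp [segRec]

theorem main_invariant (lines : List String) :
    (∀ (acc : List Int) (b : Int),
        finalizeA (List.foldl stepA (acc, 0, false, b) lines) = acc ++ segRec (lines.map classifyB))
    ∧ (∀ (acc : List Int) (c : Int) (b : Int), 1 ≤ c →
        finalizeA (List.foldl stepA (acc, c, true, b) lines)
          = acc ++ countB b c ((lines.map classifyB).takeWhile pNotD)
              :: segRec ((lines.map classifyB).dropWhile pNotD)) := by
  induction lines with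
  | nil =>
    constructor
    · intro acc b; simp [finalizeA, segRec]
    · intro acc c b hc
      simp [List.foldl, finalizeA, countB, segRec, show (0:Int) < c by omega]
  | cons line rest ih =>
    obtain ⟨ih1, ih2⟩ := ih
    constructor
    · intro acc b
      rw [List.foldl_cons]
      by_cases hdef : PySem.Chars.startswith (PySem.Chars.strip line.toList) ['d','e','f',' '] = true
      · rw [show stepA (acc, 0, false, b) line = (acc, 1, true, pvBase line) from by
          simp [stepA, hdef]]
        rw [ih2 acc 1 (pvBase line) (le_refl 1)]
        rw [show (line :: rest).map classifyB = ("D", pvBase line) :: rest.map classifyB from by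
          simp [classifyB, hdef]]
        simp [segRec]
      · rw [show stepA (acc, 0, false, b) line = (acc, 0, false, b) from by
          simp [stepA, hdef], ih1 acc b,
          show (line :: rest).map classifyB = classifyB line :: rest.map classifyB from rfl,
          segRec_classify_cons line (rest.map classifyB) hdef]
    · intro acc c b hc
      rw [List.foldl_cons,
        show (line :: rest).map classifyB = classifyB line :: rest.map classifyB from rfl]
      by_cases hdef : PySem.Chars.startswith (PySem.Chars.strip line.toList) ['d','e','f',' '] = true
      · rw [show stepA (acc, c, true, b) line = (acc ++ [c], 1, true, pvBase line) from by
          simp [stepA, hdef, show (0:Int) < c by omega]]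
        rw [ih2 (acc ++ [c]) 1 (pvBase line) (le_refl 1)]
        rw [show classifyB line = ("D", pvBase line) from by simp [classifyB, hdef]]
        simp [pNotD, countB, segRec]
      · by_cases hblank : PySem.Str.strip line = ""
        · rw [show stepA (acc, c, true, b) line = (acc, c + 1, true, b) from by
            simp [stepA, hblank]
            intro h; exact absurd h (by decide)]
          rw [ih2 acc (c + 1) b (by omega)]
          rw [show classifyB line = ("A", 0) from by
            simp [classifyB, hblank]
            decide]
          simp [pNotD, countB]
        · by_cases h3 : PySem.Chars.startswith (PySem.Chars.strip line.toList) ['"','"','"'] = true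
          · rw [show stepA (acc, c, true, b) line = (acc, c + 1, true, b) from by
              simp [stepA, hdef, hblank, h3]]
            rw [ih2 acc (c + 1) b (by omega)]
            rw [show classifyB line = ("A", 0) from by simp [classifyB, hdef, hblank, h3]]
            simp [pNotD, countB]
          · by_cases h4 : PySem.Chars.startswith (PySem.Chars.strip line.toList) ['\'','\'','\''] = true
            · rw [show stepA (acc, c, true, b) line = (acc, c + 1, true, b) from by
                simp [stepA, hdef, hblank, h3, h4]]
              rw [ih2 acc (c + 1) b (by omega)]
              rw [show classifyB line = ("A", 0) from by simp [classifyB, hdef, hblank, h3, h4]]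
              simp [pNotD, countB]
            · by_cases h2 : PySem.Chars.startswith line.toList (pvSpaces (b + 1)).toList = true
              · have hlead : b + 1 ≤ pvLead line := (startswith_spaces_iff line b).mp (by simpa using h2)
                rw [show stepA (acc, c, true, b) line = (acc, c + 1, true, b) from by
                  simp [stepA, hdef, hblank, h2]]
                rw [ih2 acc (c + 1) b (by omega)]
                by_cases hcom : PySem.Chars.startswith (PySem.Chars.strip line.toList) ['#'] = true
                · rw [show classifyB line = ("C", pvLead line) from by
                    simp [classifyB, hdef, hblank, h3, h4, hcom]]
                  simp [pNotD, countB, hlead]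
                · rw [show classifyB line = ("O", pvLead line) from by
                    simp [classifyB, hdef, hblank, h3, h4, hcom]]
                  simp [pNotD, countB, hlead]
              · have hnlead : ¬ (b + 1 ≤ pvLead line) := fun hle => h2 (by
                  have := (startswith_spaces_iff line b).mpr hle
                  simpa using this)
                by_cases hcom : PySem.Chars.startswith (PySem.Chars.strip line.toList) ['#'] = true
                · rw [show stepA (acc, c, true, b) line = (acc, c, true, b) from by
                    simp [stepA, hdef, hblank, h2, h3, h4, hcom]]
                  rw [ih2 acc c b hc]
                  rw [show classifyB line = ("C", pvLead line) from by
                    simp [classifyB, hdef, hblank, h3, h4, hcom]]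
                  simp [pNotD, countB, hnlead]
                · rw [show stepA (acc, c, true, b) line = (acc ++ [c], 0, false, b) from by
                    simp [stepA, hdef, hblank, h2, h3, h4, hcom, show (0:Int) < c by omega]]
                  rw [ih1 (acc ++ [c]) b]
                  rw [show classifyB line = ("O", pvLead line) from by
                    simp [classifyB, hdef, hblank, h3, h4, hcom]]
                  rw [show List.takeWhile pNotD (("O", pvLead line) :: rest.map classifyB)
                        = ("O", pvLead line) :: List.takeWhile pNotD (rest.map classifyB) from by
                    simp [pNotD],
                    show List.dropWhile pNotD (("O", pvLead line) :: rest.map classifyB)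
                        = List.dropWhile pNotD (rest.map classifyB) from by
                    simp [pNotD],
                    segRec_dropWhile]
                  simp [countB, hnlead]

-- ===== VERDICT (by name: the statement is the Claim_ definition above) =====
theorem analyze_function_lengths_py_spec : Claim_equal_analyze_function_lengths_py := by
  intro content _
  unfold Spec_analyze_function_lengths_py
  rw [alt_eq_idxVer, idxVer_eq_segRec]
  have h := (main_invariant (PySem.Str.splitlines content)).1 [] 0
  simpa [analyze_function_lengths_py, finalizeA] using h
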